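-- pv_equiv track=rewrite | github.com/sri-harsh/google-codejam-2019 | googlecodejam2019-qualifiers-question1.py | check
-- ===== SOURCE A (Python) =====
-- def calc(n):
--     val=0
--     l=len(n)-1
--     for i in n:
--         val=val+i*(10**l)
--         l-=1
--     return val
--
-- def check(amint,am):
--     amintrep=[]
--     mul=len(am)-1
--     for i in am:
--         amintrep.append(int(i))
--         mul-=1
--     otherintrep=[]
--     for i in range(len(amintrep)):
--         if amintrep[i]==4:
--             otherintrep.append(2)
--             amintrep[i]=2
--         else:
--             otherintrep.append(0)
--     return [str(calc(amintrep)),str(calc(otherintrep))]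
-- ===== SOURCE B (Python) =====
-- def check(amint, am):
--     a = b = 0
--     for c in am:
--         d = int(c)
--         if d == 4:
--             a, b = a * 10 + 2, b * 10 + 2
--         else:
--             a, b = a * 10 + d, b * 10
--     return [str(a), str(b)]
-- ===== Notes on version B (the rewrite author's own statement) =====
-- stated objective: simpler
-- what changed: Replaces A's three passes (build a digit list, rewrite 4s in place while appending to a second list, then sum digit*10**position in a hand-rolled calc loop) with a single Horner-style pass over the string that accumulates both summands directly as integers.
import Mathlib
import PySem

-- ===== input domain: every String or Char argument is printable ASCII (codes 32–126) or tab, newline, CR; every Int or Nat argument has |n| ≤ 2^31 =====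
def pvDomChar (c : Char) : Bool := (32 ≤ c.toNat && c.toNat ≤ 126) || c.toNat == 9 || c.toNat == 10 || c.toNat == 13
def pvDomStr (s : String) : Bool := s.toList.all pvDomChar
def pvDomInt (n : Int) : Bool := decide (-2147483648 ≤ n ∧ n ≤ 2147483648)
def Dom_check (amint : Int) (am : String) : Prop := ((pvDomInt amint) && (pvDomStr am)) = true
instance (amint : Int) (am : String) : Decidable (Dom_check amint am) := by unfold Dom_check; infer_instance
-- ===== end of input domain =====

-- B replaces A's three passes (digit list, in-place 4→2 rewrite, positional 10**l summation)
-- by one Horner-style pass over the string accumulating both summands; objective: simpler.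

-- ===== PORT A =====
-- calc(n): positional-value loop.  Python's 10**l is used only while l ≥ 0 (l counts down from
-- len-1 and is read before each decrement), so `10 ^ p.2.toNat` is exact there.
def calcA (n : List Int) : Int :=
  (n.foldl (fun (p : Int × Int) i => (p.1 + i * 10 ^ p.2.toNat, p.2 - 1))
    (0, PySem.List.len n - 1)).1

-- int(c) for a single char c → (PySem.Int.ofChars? [c]).getD 0; the `none` (ValueError) case is
-- excluded by Pre_check, under which ofChars? always returns `some`.
def check (amint : Int) (am : String) : List String :=
  let st1 := am.toList.foldl
    (fun (p : List Int × Int) c => (p.1 ++ [(PySem.Int.ofChars? [c]).getD 0], p.2 - 1))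
    ([], PySem.Str.len am - 1)
  let amintrep := st1.1
  let st2 := (PySem.List.pyRange 0 (PySem.List.len amintrep)).foldl
    (fun (p : List Int × List Int) i =>
      if PySem.List.pyGetD p.1 i 0 = 4 then (PySem.List.pySetD p.1 i 2, p.2 ++ [2])
      else (p.1, p.2 ++ [0]))
    (amintrep, [])
  [PySem.Int.toStr (calcA st2.1), PySem.Int.toStr (calcA st2.2)]

-- ===== PORT B =====
def check_alt (amint : Int) (am : String) : List String :=
  let p := am.toList.foldl
    (fun (p : Int × Int) c =>
      let d := (PySem.Int.ofChars? [c]).getD 0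
      if d = 4 then (p.1 * 10 + 2, p.2 * 10 + 2) else (p.1 * 10 + d, p.2 * 10))
    (0, 0)
  [PySem.Int.toStr p.1, PySem.Int.toStr p.2]

-- ===== PRECONDITION & SPEC =====
-- Pre_ excludes exactly the inputs where Python A raises ValueError: int(c) on a non-digit char.
def Pre_check (amint : Int) (am : String) : Prop := (am.toList.all (fun c => 48 ≤ c.toNat && c.toNat ≤ 57)) = true
instance (amint : Int) (am : String) : Decidable (Pre_check amint am) := by
  unfold Pre_check; infer_instance
def pvWitness_check : Int × String := (0, "1440")

def Spec_check (amint : Int) (am : String) (out : List String) : Prop := out = check_alt amint am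
instance (amint : Int) (am : String) (out : List String) : Decidable (Spec_check amint am out) := by
  unfold Spec_check; infer_instance

-- ===== CLAIM (what is proved, stated in full; the proofs are below) =====
def Claim_equal_check : Prop := ∀ (amint : Int) (am : String), Dom_check amint am → Pre_check amint am → Spec_check amint am (check amint am)

-- ===== LEMMAS AND PROOFS =====

-- Horner evaluation of a digit list, and the two per-digit rewrites of A's second loop.
def hornerL (ds : List Int) (a : Int) : Int := ds.foldl (fun v d => v * 10 + d) a
def fRw (d : Int) : Int := if d = 4 then 2 else d
def gRw (d : Int) : Int := if d = 4 then 2 else 0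
def digC (c : Char) : Int := (PySem.Int.ofChars? [c]).getD 0

theorem hornerL_shift (ds : List Int) (a : Int) :
    hornerL ds a = a * 10 ^ ds.length + hornerL ds 0 := by
  induction ds generalizing a with
  | nil => simp [hornerL]
  | cons d ds ih =>
      simp only [hornerL, List.foldl_cons, List.length_cons] at *
      rw [ih (a * 10 + d), ih (0 * 10 + d)]
      ring

theorem positional_eq_horner (ds : List Int) (v0 : Int) :
    (ds.foldl (fun (p : Int × Int) i => (p.1 + i * 10 ^ p.2.toNat, p.2 - 1))
      (v0, (ds.length : Int) - 1)).1 = v0 + hornerL ds 0 := by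
  induction ds generalizing v0 with
  | nil => simp [hornerL]
  | cons d ds ih =>
      simp only [List.foldl_cons, List.length_cons]
      rw [show (↑(ds.length + 1) : Int) - 1 = (ds.length : Int) by push_cast; omega]
      rw [show ((ds.length : Int)).toNat = ds.length by omega]
      rw [ih (v0 + d * 10 ^ ds.length)]
      have hs := hornerL_shift ds d
      simp only [hornerL, List.foldl_cons] at hs ⊢
      simp only [zero_mul, zero_add] at hs ⊢
      omega

theorem calcA_eq_horner (ds : List Int) : calcA ds = hornerL ds 0 := by
  have := positional_eq_horner ds 0
  simpa [calcA, PySem.List.len_eq] using this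

-- A's second loop as a fold over List.range, with the processed prefix already rewritten.
theorem rewrite_loop_invariant (suf pre acc : List Int) :
    ((List.range' pre.length suf.length).foldl
      (fun (p : List Int × List Int) (k : Nat) =>
        if PySem.List.pyGetD p.1 (k : Int) 0 = 4
        then (PySem.List.pySetD p.1 (k : Int) 2, p.2 ++ [2])
        else (p.1, p.2 ++ [0]))
      (pre ++ suf, acc))
    = (pre ++ suf.map fRw, acc ++ suf.map gRw) := by
  induction suf generalizing pre acc with
  | nil => simp
  | cons d suf ih =>
      simp only [List.length_cons, List.range'_succ, List.foldl_cons]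
      have hget : PySem.List.pyGetD (pre ++ d :: suf) (pre.length : Int) 0 = d := by
        rw [PySem.List.pyGetD_natCast, List.getD_append_right pre (d :: suf) 0 pre.length le_rfl]
        simp [List.getD]
      have hset : PySem.List.pySetD (pre ++ d :: suf) (pre.length : Int) 2 = (pre ++ [2]) ++ suf := by
        rw [PySem.List.pySetD_natCast, List.set_append_right pre.length 2 le_rfl]
        simp
      rw [hget]
      by_cases hd : d = 4
      · rw [if_pos hd, hset]
        have := ih (pre ++ [2]) (acc ++ [2])
        simp only [List.length_append, List.length_cons, List.length_nil] at this ⊢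
        rw [this]
        simp [fRw, gRw, hd]
      · rw [if_neg hd]
        have : pre ++ d :: suf = (pre ++ [d]) ++ suf := by simp
        rw [this]
        have := ih (pre ++ [d]) (acc ++ [0])
        simp only [List.length_append, List.length_cons, List.length_nil] at this ⊢
        rw [this]
        simp [fRw, gRw, hd]

-- ===== VERDICT (by name: the statement is the Claim_ definition above) =====
theorem check_spec : Claim_equal_check := by
  intro amint am _ _
  unfold Spec_check check check_alt
  -- first loop of A: the (list, mul) pair splits into two independent folds; the list is a map
  rw [PySem.List.foldl_prod_mk (fun l c => l ++ [(PySem.Int.ofChars? [c]).getD 0])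
      (fun (m : Int) _ => m - 1) am.toList [] (PySem.Str.len am - 1)]
  rw [PySem.List.foldl_append_singleton_eq_map (fun c => (PySem.Int.ofChars? [c]).getD 0) am.toList []]
  simp only [List.nil_append]
  set ds := am.toList.map (fun c => (PySem.Int.ofChars? [c]).getD 0) with hds
  -- second loop of A: the rewrite-loop invariant at pre = [], acc = []
  have hlen : PySem.List.len ds = ((ds.length : Nat) : Int) := PySem.List.len_eq ds
  rw [hlen, PySem.List.pyRange_zero_natCast, List.foldl_map]
  have h2 := rewrite_loop_invariant ds [] []
  simp only [List.length_nil, List.nil_append] at h2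
  rw [List.range_eq_range', h2]
  -- B's pair fold splits into two Horner folds
  have hB : (am.toList.foldl
      (fun (p : Int × Int) c =>
        let d := (PySem.Int.ofChars? [c]).getD 0
        if d = 4 then (p.1 * 10 + 2, p.2 * 10 + 2) else (p.1 * 10 + d, p.2 * 10))
      (0, 0))
      = (am.toList.foldl (fun v c => v * 10 + fRw (digC c)) 0,
         am.toList.foldl (fun v c => v * 10 + gRw (digC c)) 0) := by
    have hstep : (fun (p : Int × Int) c =>
        let d := (PySem.Int.ofChars? [c]).getD 0
        if d = 4 then (p.1 * 10 + 2, p.2 * 10 + 2) else (p.1 * 10 + d, p.2 * 10))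
        = fun (p : Int × Int) c => (p.1 * 10 + fRw (digC c), p.2 * 10 + gRw (digC c)) := by
      funext p c
      by_cases h : (PySem.Int.ofChars? [c]).getD 0 = 4 <;> simp [fRw, gRw, digC, h]
    rw [hstep, PySem.List.foldl_prod_mk (fun v c => v * 10 + fRw (digC c))
        (fun v c => v * 10 + gRw (digC c)) am.toList 0 0]
  rw [hB]
  -- both sides are Horner evaluations of the same rewritten digit lists
  rw [calcA_eq_horner, calcA_eq_horner]
  have hf : hornerL (ds.map fRw) 0 = am.toList.foldl (fun v c => v * 10 + fRw (digC c)) 0 := by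
    simp [hornerL, hds, List.map_map, List.foldl_map, digC]
  have hg : hornerL (ds.map gRw) 0 = am.toList.foldl (fun v c => v * 10 + gRw (digC c)) 0 := by
    simp [hornerL, hds, List.map_map, List.foldl_map, digC]
  rw [hf, hg]
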